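-- pv_equiv track=rewrite | github.com/atayur03/OFCP | Hand5.py | is_valid_hand3
-- ===== SOURCE A (Python) =====
-- RANKS = "23456789TJQKA"
--
-- SUITS = "cdhs"
--
-- def is_valid_hand3(hand_str: str):
--     """Verifies if the input string represents a valid 5-card poker hand."""
--     if len(hand_str) != 6:
--         return False
--
--     parsed_cards = [hand_str[i:i+2] for i in range(0, len(hand_str), 2)]
--     if len(parsed_cards) != 3:
--         return False
--
--     for card in parsed_cards:
--         if card[0] not in RANKS or card[1] not in SUITS:
--             return False
--     return True
-- ===== SOURCE B (Python) =====
-- RANKS = "23456789TJQKA"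
--
-- SUITS = "cdhs"
--
-- def is_valid_hand3(hand_str: str):
--     """Verifies if the input string represents a valid 3-card hand string."""
--     if len(hand_str) != 6:
--         return False
--     return all(c in (RANKS if i % 2 == 0 else SUITS)
--                for i, c in enumerate(hand_str))
-- ===== Notes on version B (the rewrite author's own statement) =====
-- stated objective: idiomatic
-- what changed: B does one enumerate pass over the characters, checking even positions against RANKS and odd positions against SUITS, instead of slicing the string into 2-char cards and checking each card's two characters.
import Mathlib
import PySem

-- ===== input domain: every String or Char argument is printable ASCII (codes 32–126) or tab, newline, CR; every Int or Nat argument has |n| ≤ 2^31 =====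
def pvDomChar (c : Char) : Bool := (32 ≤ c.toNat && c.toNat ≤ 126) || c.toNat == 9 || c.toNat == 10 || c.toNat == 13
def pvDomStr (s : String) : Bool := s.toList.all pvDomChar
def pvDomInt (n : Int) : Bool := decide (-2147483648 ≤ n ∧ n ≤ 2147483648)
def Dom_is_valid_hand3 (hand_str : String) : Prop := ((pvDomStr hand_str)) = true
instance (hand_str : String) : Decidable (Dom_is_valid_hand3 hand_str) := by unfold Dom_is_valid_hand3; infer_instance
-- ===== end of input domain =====

-- B replaces card slicing by a single enumerate pass with position-dependent membership (idiomatic, same behaviour).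


-- ===== PORT A =====
def pyRANKS : List Char := "23456789TJQKA".toList

def pySUITS : List Char := "cdhs".toList

-- card[0] / card[1] via pyGet? (IndexError is unreachable here: every slice has length 2)
def pvCardOK (card : List Char) : Bool :=
  match PySem.List.pyGet? card 0, PySem.List.pyGet? card 1 with
  | some r, some s => pyRANKS.contains r && pySUITS.contains s
  | _, _ => false

def is_valid_hand3 (hand_str : String) : Bool :=
  let cs := hand_str.toList
  if cs.length ≠ 6 then false
  else
    let parsed_cards := (PySem.List.pyRange 0 (Int.ofNat cs.length) 2).map
      (fun i => PySem.List.slice cs (some i) (some (i + 2)))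
    if parsed_cards.length ≠ 3 then false
    else parsed_cards.all pvCardOK

-- ===== PORT B =====
def is_valid_hand3_alt (hand_str : String) : Bool :=
  let cs := hand_str.toList
  if cs.length ≠ 6 then false
  else (PySem.List.enumerate cs).all
    (fun p => if p.1 % 2 == 0 then pyRANKS.contains p.2 else pySUITS.contains p.2)

-- ===== PRECONDITION & SPEC =====
def Spec_is_valid_hand3 (hand_str : String) (out : Bool) : Prop := out = is_valid_hand3_alt hand_str
instance (hand_str : String) (out : Bool) : Decidable (Spec_is_valid_hand3 hand_str out) := by unfold Spec_is_valid_hand3; infer_instance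

-- ===== CLAIM (what is proved, stated in full; the proofs are below) =====
def Claim_equal_is_valid_hand3 : Prop := ∀ (hand_str : String), Dom_is_valid_hand3 hand_str → Spec_is_valid_hand3 hand_str (is_valid_hand3 hand_str)

-- ===== LEMMAS AND PROOFS =====
lemma pvRange_eval : PySem.List.pyRange 0 (6 : Int) 2 = [(0 : Int), 2, 4] := by decide

lemma pvSlice02 (xs : List Char) : PySem.List.slice xs none (some 2) = xs.take 2 := by
  simpa using PySem.List.slice_to_natCast xs 2

lemma pvSlice24 (xs : List Char) : PySem.List.slice xs (some 2) (some 4) = (xs.drop 2).take 2 := by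
  simpa using PySem.List.slice_natCast xs 2 4

lemma pvSlice46 (xs : List Char) : PySem.List.slice xs (some 4) (some 6) = (xs.drop 4).take 2 := by
  simpa using PySem.List.slice_natCast xs 4 6

-- ===== VERDICT (by name: the statement is the Claim_ definition above) =====
theorem is_valid_hand3_spec : Claim_equal_is_valid_hand3 := by
  intro hand_str _
  unfold Spec_is_valid_hand3 is_valid_hand3 is_valid_hand3_alt
  match h : hand_str.toList with
  | [a, b, c, d, e, f] =>
    simp [pvRange_eval, pvSlice02, pvSlice24, pvSlice46, pvCardOK,
      PySem.List.pyGet?, PySem.List.pyIdx?, PySem.List.enumerate, Bool.and_assoc]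
  | [] => simp
  | [a] => simp
  | [a,b] => simp
  | [a,b,c] => simp
  | [a,b,c,d] => simp
  | [a,b,c,d,e] => simp
  | a::b::c::d::e::f::g::rest => simp
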